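-- pv_equiv track=rewrite | github.com/rudestervo/aaf-labs-2021 | mednikova_oleksandra_fi-93/command_parser/CommandParser.py | change_quote
-- ===== SOURCE A (Python) =====
-- def change_quote(line):
--     quotes = []
--     for i in range(len(line)):
--         if line[i] == '"':
--             quotes.append(i)
--
--     new_line = ''
--     f_quote = 0
--     l_quote = 0
--     is_in_quotes = False
--     replace_quotes = {}
--
--     for i in quotes:
--         l_quote = i
--         if not is_in_quotes:
--             new_line += line[f_quote:l_quote]
--         else:
--             temp = '@_' + str(i)
--             replace_quotes[temp] = line[f_quote:l_quote]
--             new_line += temp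
--
--         is_in_quotes = not is_in_quotes
--         f_quote = l_quote + 1
--
--     new_line +=  line[f_quote:]
--     return new_line, replace_quotes
-- ===== SOURCE B (Python) =====
-- def change_quote(line):
--     # Recursive pairwise scan: find the next PAIR of quotes with str.find,
--     # replace the enclosed text by its placeholder, and recurse on the rest.
--     # An unmatched trailing opening quote is simply dropped, its tail kept raw.
--     replace_quotes = {}
--
--     def go(s, base):
--         i = s.find('"')
--         if i == -1:
--             return s
--         j = s.find('"', i + 1)
--         if j == -1:
--             return s[:i] + s[i + 1:]
--         key = '@_' + str(base + j)
--         replace_quotes[key] = s[i + 1:j]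
--         return s[:i] + key + go(s[j + 1:], base + j + 1)
--
--     return go(line, 0), replace_quotes
-- ===== Notes on version B (the rewrite author's own statement) =====
-- stated objective: faster
-- what changed: B replaces A's two staged loops (a per-character scan collecting all quote indices, then an alternating-flag fold re-slicing the line between consecutive indices) with a recursive pairwise scan: str.find locates the next pair of quotes, the enclosed text is replaced by its placeholder, and the function recurses on the remainder after the closing quote; an unmatched trailing opening quote falls out as the no-second-quote base case.
import Mathlib
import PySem

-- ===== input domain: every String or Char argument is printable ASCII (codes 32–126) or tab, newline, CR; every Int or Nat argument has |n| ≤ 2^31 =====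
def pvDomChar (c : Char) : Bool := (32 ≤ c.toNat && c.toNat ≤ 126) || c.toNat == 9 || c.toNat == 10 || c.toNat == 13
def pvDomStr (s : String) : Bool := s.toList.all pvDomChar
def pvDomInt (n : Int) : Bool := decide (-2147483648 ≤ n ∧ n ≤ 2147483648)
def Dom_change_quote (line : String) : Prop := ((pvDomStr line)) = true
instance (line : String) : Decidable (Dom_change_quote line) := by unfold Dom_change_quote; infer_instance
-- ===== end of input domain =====

-- B replaces A's index-collecting scan + alternating-flag fold with a recursive
-- pairwise scan: find the next PAIR of quotes with str.find and recurse on the rest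
-- (pairwise-find decomposition; measurably faster since the scan runs inside str.find).

-- ===== PORT A =====
-- state: (new_line, f_quote, is_in_quotes, replace_quotes); l_quote folded into f_quote := i + 1
def stepA (l : List Char) (st : List Char × Int × Bool × PySem.Dict String String) (i : Int) :
    List Char × Int × Bool × PySem.Dict String String :=
  if !st.2.2.1 then
    (st.1 ++ PySem.List.slice l (some st.2.1) (some i), i + 1, true, st.2.2.2)
  else
    let temp := '@' :: '_' :: PySem.Int.toChars i
    (st.1 ++ temp, i + 1, false,
      st.2.2.2.insert (String.ofList temp) (String.ofList (PySem.List.slice l (some st.2.1) (some i))))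

def change_quote (line : String) : String × (List (String × String)) :=
  let l := line.toList
  let quotes : List Int := (PySem.List.pyRange 0 l.length 1).foldl
      (fun acc i => if PySem.List.pyGetD l i ' ' = '"' then acc ++ [i] else acc) []
  let st := quotes.foldl (stepA l) ([], 0, false, PySem.Dict.empty)
  (String.ofList (st.1 ++ PySem.List.slice l (some st.2.1) none), st.2.2.2.items)

-- ===== PORT B =====
-- go(s, base): find the next two quotes in s; fuel only makes the recursion total
-- (the top-level call supplies fuel > length, so the 0 case is never reached).
def goB : Nat → List Char → Int → PySem.Dict String String → List Char × PySem.Dict String String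
  | 0, s, _, rep => (s, rep)
  | fuel+1, s, base, rep =>
    let i := PySem.Chars.find s ['"']
    if i = -1 then (s, rep)
    else
      let j := PySem.Chars.findFrom s ['"'] (i+1) none
      if j = -1 then
        (PySem.List.slice s none (some i) ++ PySem.List.slice s (some (i+1)) none, rep)
      else
        let key := '@' :: '_' :: PySem.Int.toChars (base + j)
        let r := goB fuel (PySem.List.slice s (some (j+1)) none) (base + j + 1)
            (rep.insert (String.ofList key) (String.ofList (PySem.List.slice s (some (i+1)) (some j))))
        (PySem.List.slice s none (some i) ++ key ++ r.1, r.2)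

def change_quote_alt (line : String) : String × (List (String × String)) :=
  let r := goB (line.toList.length + 1) line.toList 0 PySem.Dict.empty
  (String.ofList r.1, r.2.items)

-- ===== PRECONDITION & SPEC =====
def Spec_change_quote (line : String) (out : String × (List (String × String))) : Prop := out = change_quote_alt line
instance (line : String) (out : String × (List (String × String))) : Decidable (Spec_change_quote line out) := by unfold Spec_change_quote; infer_instance

-- ===== CLAIM (what is proved, stated in full; the proofs are below) =====
def Claim_equal_change_quote : Prop := ∀ (line : String), Dom_change_quote line → Spec_change_quote line (change_quote line)

-- ===== LEMMAS AND PROOFS =====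

-- quote positions of a char list, as a structural recursion
def qIdx : List Char → List Nat
  | [] => []
  | c :: t => if c = '"' then 0 :: (qIdx t).map (· + 1) else (qIdx t).map (· + 1)

theorem qIdx_of_not_mem {t : List Char} (h : '"' ∉ t) : qIdx t = [] := by
  induction t with
  | nil => rfl
  | cons c t ih =>
    simp only [List.mem_cons, not_or] at h
    simp [qIdx, Ne.symm h.1, ih h.2]

theorem qIdx_decomp {s : List Char} (t : List Char) (h : '"' ∉ s) :
    qIdx (s ++ '"' :: t) = s.length :: (qIdx t).map (· + (s.length + 1)) := by
  induction s with
  | nil => simp [qIdx]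
  | cons c s ih =>
    simp only [List.mem_cons, not_or] at h
    simp only [List.cons_append, qIdx, Ne.symm h.1, ih h.2]
    simp [List.map_map, Function.comp_def]
    intro a _
    omega

theorem quotesA_eq : ∀ (t u v : List Char) (acc : List Int), v = u ++ t →
    (PySem.List.pyRange (u.length) (u.length + t.length) 1).foldl
      (fun a i => if PySem.List.pyGetD v i ' ' = '"' then a ++ [i] else a) acc
    = acc ++ (qIdx t).map (fun k => ((u.length + k : Nat) : Int)) := by
  intro t
  induction t with
  | nil =>
    intro u v acc hv
    simp [PySem.List.pyRange, qIdx]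
  | cons c t ih =>
    intro u v acc hv
    have hlt : (u.length : Int) < u.length + (c :: t).length := by
      simp only [List.length_cons]; push_cast; omega
    rw [PySem.List.pyRange_one_cons hlt]
    simp only [List.foldl_cons]
    have hget : PySem.List.pyGetD v (u.length) ' ' = c := by
      rw [hv, PySem.List.pyGetD_natCast]
      simp
    rw [hget]
    have hrange : (u.length : Int) + 1 = ((u ++ [c]).length : Int) := by simp
    have hend : (u.length : Int) + (c :: t).length = ((u ++ [c]).length : Int) + t.length := by
      simp; omega
    have hv' : v = (u ++ [c]) ++ t := by simp [hv]
    by_cases hc : c = '"'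
    · rw [if_pos hc]
      rw [hrange, hend, ih (u ++ [c]) v (acc ++ [(u.length : Int)]) hv']
      subst hc
      simp [qIdx, List.map_map, Function.comp_def]
      intro a _; ring
    · rw [if_neg hc]
      rw [hrange, hend, ih (u ++ [c]) v acc hv']
      simp [qIdx, hc, List.map_map, Function.comp_def]
      intro a _; ring

theorem mem_decomp {t : List Char} (hq : '"' ∈ t) :
    ∃ s t', '"' ∉ s ∧ t = s ++ '"' :: t' := by
  induction t with
  | nil => simp at hq
  | cons c r ih =>
    by_cases hc : c = '"'
    · exact ⟨[], r, by simp, by simp [hc]⟩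
    · have : '"' ∈ r := by
        rcases List.mem_cons.mp hq with h | h
        · exact absurd h.symm hc
        · exact h
      obtain ⟨s, t', hs, ht⟩ := ih this
      exact ⟨c :: s, t', by simp [hs]; exact fun e => hc e.symm, by simp [ht]⟩

theorem find_of_not_mem {t : List Char} (h : '"' ∉ t) : PySem.Chars.find t ['"'] = -1 := by
  rw [PySem.Chars.find_eq_neg_one_iff, List.singleton_infix_iff]
  exact h

theorem find_decomp {s : List Char} (t : List Char) (h : '"' ∉ s) :
    PySem.Chars.find (s ++ '"' :: t) ['"'] = (s.length : Int) := by
  have hinf : ['"'] <:+: (s ++ '"' :: t) := by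
    rw [List.singleton_infix_iff]; simp
  have h0 : 0 ≤ PySem.Chars.find (s ++ '"' :: t) ['"'] := (PySem.Chars.find_nonneg_iff _ _).mpr hinf
  obtain ⟨hpre, hmin⟩ := PySem.Chars.find_spec (s := s ++ '"' :: t) (sub := ['"']) h0
  set f := (PySem.Chars.find (s ++ '"' :: t) ['"']).toNat with hf
  have hpre_s : ['"'] <+: ((s ++ '"' :: t).drop s.length) := by
    rw [List.drop_left]
    exact ⟨t, rfl⟩
  have hle : f ≤ s.length := by
    by_contra hlt
    exact hmin s.length (by omega) hpre_s
  have hfe : f = s.length := by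
    rcases Nat.lt_or_ge f s.length with hlt | hge
    · exfalso
      obtain ⟨r, hr⟩ := hpre
      have : (s ++ '"' :: t).drop f = s.drop f ++ '"' :: t := List.drop_append_of_le_length (by omega)
      rw [this] at hr
      have hnn : s.drop f ≠ [] := by
        intro he; have := congrArg List.length he; simp at this; omega
      cases hd : s.drop f with
      | nil => exact hnn hd
      | cons a u =>
        rw [hd] at hr
        simp only [List.cons_append, List.cons.injEq] at hr
        have ha : a ∈ s := by
          have : a ∈ s.drop f := by rw [hd]; simp
          exact List.mem_of_mem_drop this
        exact h (hr.1 ▸ ha)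
    · omega
  omega

-- slice facts at Nat-cast positions, specialised to the split shapes we use
theorem slice_take {s : List Char} (r : List Char) :
    PySem.List.slice (s ++ r) none (some (s.length : Int)) = s := by
  rw [PySem.List.slice_to_natCast, List.take_left]

theorem slice_drop {s : List Char} (r : List Char) (k : Nat) (hk : k = s.length) :
    PySem.List.slice (s ++ r) (some (k : Int)) none = r := by
  subst hk; rw [PySem.List.slice_from_natCast, List.drop_left]

theorem slice_mid {u s : List Char} (r : List Char) :
    PySem.List.slice (u ++ (s ++ r)) (some (u.length : Int)) (some ((u.length + s.length : Nat) : Int)) = s := by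
  rw [PySem.List.slice_natCast, List.drop_left]
  have e : u.length + s.length - u.length = s.length := by omega
  rw [e, List.take_left]

-- one-step unfolding of goB at positive fuel (rfl on the definition)
theorem goB_succ (fuel : Nat) (s : List Char) (base : Int) (rep : PySem.Dict String String) :
    goB (fuel+1) s base rep =
    (if PySem.Chars.find s ['"'] = -1 then (s, rep)
     else if PySem.Chars.findFrom s ['"'] (PySem.Chars.find s ['"'] + 1) none = -1 then
        (PySem.List.slice s none (some (PySem.Chars.find s ['"'])) ++
          PySem.List.slice s (some (PySem.Chars.find s ['"'] + 1)) none, rep)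
     else
        let j := PySem.Chars.findFrom s ['"'] (PySem.Chars.find s ['"'] + 1) none
        let key := '@' :: '_' :: PySem.Int.toChars (base + j)
        let r := goB fuel (PySem.List.slice s (some (j+1)) none) (base + j + 1)
            (rep.insert (String.ofList key)
              (String.ofList (PySem.List.slice s (some (PySem.Chars.find s ['"'] + 1)) (some j))))
        (PySem.List.slice s none (some (PySem.Chars.find s ['"'])) ++ key ++ r.1, r.2)) := rfl

-- the main simultaneous induction: A's fold over the (shifted) quote positions of the
-- suffix t, from an out-of-quotes state, equals B's pairwise recursion on t
theorem main_loop : ∀ (fuel : Nat) (t u nl : List Char) (rep : PySem.Dict String String),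
    t.length ≤ fuel →
    (let st := ((qIdx t).map (fun k => ((u.length + k : Nat) : Int))).foldl (stepA (u ++ t))
        (nl, (u.length : Int), false, rep)
     (st.1 ++ PySem.List.slice (u ++ t) (some st.2.1) none, st.2.2.2))
    =
    (nl ++ (goB (fuel + 1) t (u.length : Int) rep).1, (goB (fuel + 1) t (u.length : Int) rep).2) := by
  intro fuel
  induction fuel with
  | zero =>
    intro t u nl rep ht
    have ht0 : t = [] := List.eq_nil_of_length_eq_zero (by omega)
    subst ht0
    simp only [qIdx, List.map_nil, List.foldl_nil]
    rw [goB_succ, find_of_not_mem (show '"' ∉ ([] : List Char) by simp), if_pos rfl]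
    rw [slice_drop [] u.length rfl]
  | succ n ih =>
    intro t u nl rep ht
    by_cases hq : '"' ∈ t
    · obtain ⟨s, t', hs, rfl⟩ := mem_decomp hq
      have hfind : PySem.Chars.find (s ++ '"' :: t') ['"'] = (s.length : Int) := find_decomp t' hs
      rw [goB_succ, hfind]
      rw [if_neg (show ¬((s.length : Int) = -1) by omega)]
      have hcast1 : ((s.length : Int) + 1) = ((s.length + 1 : Nat) : Int) := by push_cast; ring
      have hklen : s.length + 1 ≤ (s ++ '"' :: t').length := by simp
      have hdrop : (s ++ '"' :: t').drop (s.length + 1) = t' := by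
        have : s ++ '"' :: t' = (s ++ ['"']) ++ t' := by simp
        rw [this]
        have e : s.length + 1 = (s ++ ['"']).length := by simp
        rw [e, List.drop_left]
      by_cases hq' : '"' ∈ t'
      · -- second quote exists: one pair handled, recurse
        obtain ⟨s2, t'', hs2, rfl⟩ := mem_decomp hq'
        have hfind2 : PySem.Chars.find (s2 ++ '"' :: t'') ['"'] = (s2.length : Int) :=
          find_decomp t'' hs2
        have hff : PySem.Chars.findFrom (s ++ '"' :: (s2 ++ '"' :: t'')) ['"']
            ((s.length : Int) + 1) none = ((s.length + 1 + s2.length : Nat) : Int) := by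
          rw [hcast1, PySem.Chars.findFrom_natCast _ _ _ hklen, hdrop, hfind2]
          rw [if_neg (by omega)]
          push_cast; ring
        rw [hff]
        rw [if_neg (by omega)]
        -- A side: unfold the first two quote indices
        rw [qIdx_decomp _ hs, qIdx_decomp _ hs2]
        simp only [List.map_cons, List.map_map, List.foldl_cons]
        -- two A steps
        simp only [stepA, Bool.not_false, if_pos]
        have e1 : PySem.List.slice (u ++ (s ++ '"' :: (s2 ++ '"' :: t'')))
            (some (u.length : Int)) (some ((u.length + s.length : Nat) : Int)) = s := by
          have : u ++ (s ++ '"' :: (s2 ++ '"' :: t'')) = u ++ (s ++ ('"' :: (s2 ++ '"' :: t''))) := rfl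
          rw [this, slice_mid]
        rw [e1]
        simp only [Bool.not_true, Bool.false_eq_true, if_false]
        have ecast2 : ((u.length + s.length : Nat) : Int) + 1
            = ((u.length + (s2.length + (s.length + 1)) : Nat) : Int) - (s2.length : Int) := by
          push_cast; ring
        have eidx2 : ((u.length + (s2.length + (s.length + 1)) : Nat) : Int)
            = ((u ++ (s ++ ['"'])).length + s2.length : Nat) := by push_cast; simp; ring
        have e2 : PySem.List.slice (u ++ (s ++ '"' :: (s2 ++ '"' :: t'')))
            (some (((u.length + s.length : Nat) : Int) + 1))
            (some ((u.length + (s2.length + (s.length + 1)) : Nat) : Int)) = s2 := by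
          have hsh : u ++ (s ++ '"' :: (s2 ++ '"' :: t''))
              = (u ++ (s ++ ['"'])) ++ (s2 ++ '"' :: t'') := by simp
          have hst : ((u.length + s.length : Nat) : Int) + 1 = (((u ++ (s ++ ['"'])).length : Nat) : Int) := by
            push_cast; simp; ring
          rw [hsh, hst, eidx2, slice_mid]
        rw [e2]
        -- the two keys agree
        have hkey : (u.length : Int) + ((s.length + 1 + s2.length : Nat) : Int)
            = ((u.length + (s2.length + (s.length + 1)) : Nat) : Int) := by push_cast; ring
        -- recursive argument of B is t''
        have hbarg : PySem.List.slice (s ++ '"' :: (s2 ++ '"' :: t''))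
            (some (((s.length + 1 + s2.length : Nat) : Int) + 1)) none = t'' := by
          have hsh : s ++ '"' :: (s2 ++ '"' :: t'') = (s ++ '"' :: s2 ++ ['"']) ++ t'' := by simp
          have hc : ((s.length + 1 + s2.length : Nat) : Int) + 1
              = ((s.length + 1 + s2.length + 1 : Nat) : Int) := by push_cast; ring
          rw [hsh, hc, slice_drop t'' _ (by simp; omega)]
        rw [hbarg]
        -- apply IH with u' = u ++ s ++ ['"'] ++ s2 ++ ['"']
        have hmap : List.map ((fun k => ((u.length + k : Nat) : Int)) ∘
              ((· + (s.length + 1)) ∘ (fun k => k + (s2.length + 1)))) (qIdx t'')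
            = List.map (fun k => (((u ++ (s ++ '"' :: s2 ++ ['"'])).length + k : Nat) : Int)) (qIdx t'') := by
          apply List.map_congr_left; intro k _
          simp only [Function.comp_apply, List.length_append, List.length_cons, List.length_nil]
          push_cast; ring
        have happ : u ++ (s ++ '"' :: (s2 ++ '"' :: t'')) = (u ++ (s ++ '"' :: s2 ++ ['"'])) ++ t'' := by
          simp
        have ht'' : t''.length ≤ n := by simp at ht; omega
        have hIH := ih t'' (u ++ (s ++ '"' :: s2 ++ ['"']))
          (nl ++ s ++ ('@' :: '_' :: PySem.Int.toChars ((u.length + (s2.length + (s.length + 1)) : Nat) : Int)))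
          (rep.insert (String.ofList ('@' :: '_' :: PySem.Int.toChars ((u.length + (s2.length + (s.length + 1)) : Nat) : Int)))
            (String.ofList s2)) ht''
        rw [hmap, happ]
        have hposB : ((u.length + (s2.length + (s.length + 1)) : Nat) : Int) + 1
            = (((u ++ (s ++ '"' :: s2 ++ ['"'])).length : Nat) : Int) := by
          push_cast; simp; ring
        rw [hposB]
        rw [hIH]
        rw [hkey, hposB]
        have e2t : PySem.List.slice (s ++ '"' :: (s2 ++ '"' :: t''))
            (some ((s.length : Int) + 1)) (some ((s.length + 1 + s2.length : Nat) : Int)) = s2 := by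
          have hsh : s ++ '"' :: (s2 ++ '"' :: t'') = (s ++ ['"']) ++ (s2 ++ ('"' :: t'')) := by simp
          have h1 : ((s.length : Int) + 1) = (((s ++ ['"']).length : Nat) : Int) := by simp
          have h2 : ((s.length + 1 + s2.length : Nat) : Int)
              = (((s ++ ['"']).length + s2.length : Nat) : Int) := by simp
          rw [hsh, h1, h2, slice_mid]
        rw [e2t]
        simp [List.append_assoc]
      · -- unmatched opening quote: A consumes one index and appends the raw tail
        have hff : PySem.Chars.findFrom (s ++ '"' :: t') ['"'] ((s.length : Int) + 1) none = -1 := by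
          rw [hcast1, PySem.Chars.findFrom_natCast _ _ _ hklen, hdrop,
            find_of_not_mem hq', if_pos rfl]
        rw [hff, if_pos rfl]
        rw [qIdx_decomp _ hs, qIdx_of_not_mem hq']
        simp only [List.map_nil, List.map_cons, List.foldl_cons, List.foldl_nil]
        simp only [stepA, Bool.not_false, if_pos]
        have e1 : PySem.List.slice (u ++ (s ++ '"' :: t'))
            (some (u.length : Int)) (some ((u.length + s.length : Nat) : Int)) = s := by
          have : u ++ (s ++ '"' :: t') = u ++ (s ++ ('"' :: t')) := rfl
          rw [this, slice_mid]
        rw [e1]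
        have e2 : PySem.List.slice (u ++ (s ++ '"' :: t'))
            (some (((u.length + s.length : Nat) : Int) + 1)) none = t' := by
          have hsh : u ++ (s ++ '"' :: t') = (u ++ (s ++ ['"'])) ++ t' := by simp
          have hc : ((u.length + s.length : Nat) : Int) + 1 = ((u.length + s.length + 1 : Nat) : Int) := by
            push_cast; ring
          rw [hsh, hc, slice_drop t' _ (by simp; omega)]
        rw [e2]
        have e3 : PySem.List.slice (s ++ '"' :: t') none (some (s.length : Int)) = s :=
          slice_take _
        have e4 : PySem.List.slice (s ++ '"' :: t') (some ((s.length : Int) + 1)) none = t' := by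
          have hsh : s ++ '"' :: t' = (s ++ ['"']) ++ t' := by simp
          rw [hsh, hcast1, slice_drop t' _ (by simp)]
        rw [e3, e4]
        simp [List.append_assoc]
    · -- no quote at all
      rw [qIdx_of_not_mem hq]
      simp only [List.map_nil, List.foldl_nil]
      rw [goB_succ, find_of_not_mem hq, if_pos rfl, slice_drop t u.length rfl]

-- ===== VERDICT (by name: the statement is the Claim_ definition above) =====
theorem change_quote_spec : Claim_equal_change_quote := by
  intro line _
  unfold Spec_change_quote change_quote change_quote_alt
  dsimp only
  have hq := quotesA_eq line.toList [] line.toList [] (by simp)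
  simp only [List.length_nil, Nat.cast_zero, zero_add] at hq
  rw [hq]
  have hm := main_loop line.toList.length line.toList [] [] PySem.Dict.empty le_rfl
  simp only [List.length_nil, Nat.cast_zero, List.nil_append, zero_add] at hm
  simp only [List.nil_append]
  rw [Prod.mk.injEq] at hm
  rw [hm.1, hm.2]
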